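-- pv_equiv track=rewrite | github.com/kartelj/DMCoverGenerator | formulas/cas_functions.py | n1_nova_s_total_for_months
-- ===== SOURCE A (Python) =====
-- def n1_nova_s_total_for_months(all_channels):
--     res = {}
--     for ch in ['N1','Nova S']:
--         f = {}
--         for m in range(0,12):
--             total = 0
--             for k,v in all_channels.items():
--                 channel = k.split('_')[1]
--                 if ch == channel:
--                     total += v[m]
--             f[m] = total
--         res[ch] = f
--     return res
-- ===== SOURCE B (Python) =====
-- def n1_nova_s_total_for_months(all_channels):
--     # one pass over all_channels instead of 24 rescans; totals pre-zeroed in A's key order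
--     res = {ch: {m: 0 for m in range(12)} for ch in ('N1', 'Nova S')}
--     for k, v in all_channels.items():
--         channel = k.split('_')[1]
--         if channel in res:
--             f = res[channel]
--             res[channel] = {m: f[m] + v[m] for m in range(12)}
--     return res
-- ===== Notes on version B (the rewrite author's own statement) =====
-- stated objective: alternative
-- what changed: Replaces A's channel x month x dict triple loop (24 full rescans of all_channels) by pre-zeroed per-channel tables and a single pass over all_channels.items() that routes each entry to its channel's 12 totals.
import Mathlib
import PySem

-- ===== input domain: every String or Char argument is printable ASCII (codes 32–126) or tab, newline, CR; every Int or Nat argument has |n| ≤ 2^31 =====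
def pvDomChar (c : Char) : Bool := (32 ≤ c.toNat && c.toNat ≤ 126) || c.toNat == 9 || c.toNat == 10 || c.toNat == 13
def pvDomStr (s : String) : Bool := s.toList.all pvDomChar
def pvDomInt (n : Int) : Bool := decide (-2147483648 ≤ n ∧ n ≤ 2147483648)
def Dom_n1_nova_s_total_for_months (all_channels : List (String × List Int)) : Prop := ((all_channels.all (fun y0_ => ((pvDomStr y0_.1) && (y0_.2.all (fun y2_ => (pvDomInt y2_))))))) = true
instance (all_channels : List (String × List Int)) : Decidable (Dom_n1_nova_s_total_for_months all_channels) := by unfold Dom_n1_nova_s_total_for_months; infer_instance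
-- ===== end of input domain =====

-- B replaces A's channel × month × dict triple loop (24 rescans of all_channels) by
-- pre-zeroed per-channel month tables filled in one pass over all_channels (objective: alternative; fewer scans).


-- ===== PORT A =====
-- k.split('_')[1] : split? is none only for sep = "", so .getD [] is exact here;
-- the out-of-range index defaults to "" — Pre_ excludes those inputs (Python raises IndexError).
-- res[ch] = f / f[m] = total always bind a FRESH key (ch ranges over two distinct literals,
-- m over range(12) each once), where Python's dict assignment appends: ported as list append.
def n1_nova_s_total_for_months (all_channels : List (String × List Int)) : List (String × List (Int × Int)) :=
  (["N1", "Nova S"] : List String).foldl (fun res ch =>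
    res ++ [(ch,
      (PySem.List.pyRange 0 12 1).foldl (fun f m =>
        f ++ [(m,
          all_channels.foldl (fun total kv =>
            let channel := PySem.List.pyGetD ((PySem.Str.split? kv.1 "_").getD []) 1 ""
            if ch == channel then total + PySem.List.pyGetD kv.2 m 0 else total) 0)]) [])]) []

-- ===== PORT B =====
-- res = {ch: {m: 0 for m in range(12)} for ch in ('N1','Nova S')}; then one pass;
-- 'channel in res' is an any over the keys; res[channel] = {m: f[m] + v[m] …} overwrites
-- in place, ported as map replacing the matching entry; f[m] (keys 0..11 always present)
-- is association-list lookup.  The loop body is the named helper pvAltStep.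
def pvAltStep (res : List (String × List (Int × Int))) (kv : String × List Int) : List (String × List (Int × Int)) :=
  let channel := PySem.List.pyGetD ((PySem.Str.split? kv.1 "_").getD []) 1 ""
  if res.any (fun p => p.1 == channel) then
    res.map (fun p =>
      if p.1 == channel then
        (p.1, (PySem.List.pyRange 0 12 1).map (fun m =>
          (m, (p.2.lookup m).getD 0 + PySem.List.pyGetD kv.2 m 0)))
      else p)
  else res

def n1_nova_s_total_for_months_alt (all_channels : List (String × List Int)) : List (String × List (Int × Int)) :=
  let init : List (String × List (Int × Int)) :=
    (["N1", "Nova S"] : List String).map (fun ch => (ch, (PySem.List.pyRange 0 12 1).map (fun m => (m, 0))))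
  all_channels.foldl pvAltStep init

-- ===== PRECONDITION & SPEC =====
-- Exactly where Python A returns: every key must contain '_' (else k.split('_')[1] raises
-- IndexError), and entries whose channel component is 'N1' or 'Nova S' need at least 12 values
-- (else v[m] raises IndexError).
def Pre_n1_nova_s_total_for_months (all_channels : List (String × List Int)) : Prop :=
  ∀ p ∈ all_channels,
    2 ≤ ((PySem.Str.split? p.1 "_").getD []).length ∧
    ((PySem.List.pyGetD ((PySem.Str.split? p.1 "_").getD []) 1 "" = "N1" ∨
      PySem.List.pyGetD ((PySem.Str.split? p.1 "_").getD []) 1 "" = "Nova S") → 12 ≤ p.2.length)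
instance (all_channels : List (String × List Int)) : Decidable (Pre_n1_nova_s_total_for_months all_channels) := by
  unfold Pre_n1_nova_s_total_for_months; infer_instance

def pvWitness_n1_nova_s_total_for_months : (List (String × List Int)) :=
  [("TV_N1", [1, 2, 3, 4, 5, 6, 7, 8, 9, 10, 11, 12]),
   ("TV_Nova S", [0, 0, 0, 0, 0, 0, 0, 0, 0, 0, 0, 0]),
   ("TV_RTS", [])]

def Spec_n1_nova_s_total_for_months (all_channels : List (String × List Int)) (out : List (String × List (Int × Int))) : Prop := out = n1_nova_s_total_for_months_alt all_channels
instance (all_channels : List (String × List Int)) (out : List (String × List (Int × Int))) : Decidable (Spec_n1_nova_s_total_for_months all_channels out) := by unfold Spec_n1_nova_s_total_for_months; infer_instance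

-- ===== CLAIM (what is proved, stated in full; the proofs are below) =====
def Claim_equal_n1_nova_s_total_for_months : Prop := ∀ (all_channels : List (String × List Int)), Dom_n1_nova_s_total_for_months all_channels → Pre_n1_nova_s_total_for_months all_channels → Spec_n1_nova_s_total_for_months all_channels (n1_nova_s_total_for_months all_channels)

-- ===== LEMMAS AND PROOFS =====

-- the channel component of a key
def pvChan (k : String) : String :=
  PySem.List.pyGetD ((PySem.Str.split? k "_").getD []) 1 ""

-- total of month m for channel ch over the whole input
def pvTot (ch : String) (m : Int) (xs : List (String × List Int)) : Int :=
  (xs.map (fun kv => if ch == pvChan kv.1 then PySem.List.pyGetD kv.2 m 0 else 0)).sum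

-- a finished month table for channel totals g
def pvTbl (g : Int → Int) : List (Int × Int) :=
  (PySem.List.pyRange 0 12 1).map (fun m => (m, g m))

lemma pvFoldl_tot (ch : String) (m : Int) (xs : List (String × List Int)) :
    xs.foldl (fun total kv =>
      let channel := PySem.List.pyGetD ((PySem.Str.split? kv.1 "_").getD []) 1 ""
      if ch == channel then total + PySem.List.pyGetD kv.2 m 0 else total) 0
    = pvTot ch m xs := by
  have h : (fun (total : Int) (kv : String × List Int) =>
      let channel := PySem.List.pyGetD ((PySem.Str.split? kv.1 "_").getD []) 1 ""
      if ch == channel then total + PySem.List.pyGetD kv.2 m 0 else total)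
      = fun total kv => total + (if ch == pvChan kv.1 then PySem.List.pyGetD kv.2 m 0 else 0) := by
    funext t kv; simp only [pvChan]; split_ifs <;> simp
  rw [h, PySem.List.foldl_add, pvTot, zero_add]

lemma pvA_char (xs : List (String × List Int)) :
    n1_nova_s_total_for_months xs
    = [("N1", pvTbl (fun m => pvTot "N1" m xs)), ("Nova S", pvTbl (fun m => pvTot "Nova S" m xs))] := by
  simp only [n1_nova_s_total_for_months, List.foldl, pvFoldl_tot,
    PySem.List.foldl_append_singleton_eq_map, List.nil_append, pvTbl, List.cons_append]

lemma pvLookup_tbl (g : Int → Int) (m : Int) (hm : m ∈ PySem.List.pyRange 0 12 1) :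
    ((((PySem.List.pyRange 0 12 1).map (fun m => (m, g m))).lookup m)).getD 0 = g m := by
  rw [PySem.List.mem_pyRange_one] at hm
  obtain ⟨h1, h2⟩ := hm
  have hR : PySem.List.pyRange 0 12 1 = [0, 1, 2, 3, 4, 5, 6, 7, 8, 9, 10, 11] := by decide
  rw [hR]
  interval_cases m <;> simp [List.lookup]

lemma pvTbl_update (g : Int → Int) (v : List Int) :
    (PySem.List.pyRange 0 12 1).map (fun m => (m, ((pvTbl g).lookup m).getD 0 + PySem.List.pyGetD v m 0))
    = pvTbl (fun m => g m + PySem.List.pyGetD v m 0) := by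
  unfold pvTbl
  apply List.map_congr_left
  intro m hm
  simp only [pvLookup_tbl g m hm]

lemma pvStepB (a b : Int → Int) (kv : String × List Int) :
    pvAltStep [("N1", pvTbl a), ("Nova S", pvTbl b)] kv
    = if pvChan kv.1 = "N1" then
        [("N1", pvTbl (fun m => a m + PySem.List.pyGetD kv.2 m 0)), ("Nova S", pvTbl b)]
      else if pvChan kv.1 = "Nova S" then
        [("N1", pvTbl a), ("Nova S", pvTbl (fun m => b m + PySem.List.pyGetD kv.2 m 0))]
      else [("N1", pvTbl a), ("Nova S", pvTbl b)] := by
  have hns : ("Nova S" : String) ≠ "N1" := by decide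
  simp only [pvAltStep]
  have hc : PySem.List.pyGetD ((PySem.Str.split? kv.1 "_").getD []) 1 "" = pvChan kv.1 := rfl
  rw [hc]
  by_cases h1 : pvChan kv.1 = "N1"
  · have t1 : (("N1" : String) == pvChan kv.1) = true := by simp [h1]
    have f1 : (("Nova S" : String) == pvChan kv.1) = false := by simp [h1]
    rw [if_pos h1]
    simp [t1, f1, pvTbl_update]
    exact ⟨fun h => absurd h1.symm h, fun h => absurd (h.trans h1) hns⟩
  · by_cases h2 : pvChan kv.1 = "Nova S"
    · have t2 : (("Nova S" : String) == pvChan kv.1) = true := by simp [h2]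
      have f2 : (("N1" : String) == pvChan kv.1) = false := by
        simp only [beq_eq_false_iff_ne, ne_eq, h2]; decide
      rw [if_neg h1, if_pos h2]
      simp [t2, f2, pvTbl_update]
      exact ⟨fun h => absurd h.symm h1, fun h => absurd h2.symm h⟩
    · have f1 : (("N1" : String) == pvChan kv.1) = false := by
        simp only [beq_eq_false_iff_ne, ne_eq]; exact fun h => h1 h.symm
      have f2 : (("Nova S" : String) == pvChan kv.1) = false := by
        simp only [beq_eq_false_iff_ne, ne_eq]; exact fun h => h2 h.symm
      rw [if_neg h1, if_neg h2]
      simp [f1, f2]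

lemma pvB_loop (xs : List (String × List Int)) :
    ∀ a b : Int → Int,
      xs.foldl pvAltStep [("N1", pvTbl a), ("Nova S", pvTbl b)]
      = [("N1", pvTbl (fun m => a m + pvTot "N1" m xs)),
         ("Nova S", pvTbl (fun m => b m + pvTot "Nova S" m xs))] := by
  induction xs with
  | nil => intro a b; simp [pvTot]
  | cons kv xs ih =>
    intro a b
    have htot : ∀ ch m, pvTot ch m (kv :: xs)
        = (if ch == pvChan kv.1 then PySem.List.pyGetD kv.2 m 0 else 0) + pvTot ch m xs := by
      intro ch m; simp [pvTot]
    rw [List.foldl_cons, pvStepB a b kv]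
    by_cases h1 : pvChan kv.1 = "N1"
    · rw [if_pos h1, ih]
      have hn : ("Nova S" == pvChan kv.1) = false := by simp [h1]
      have ha : (fun m => a m + PySem.List.pyGetD kv.2 m 0 + pvTot "N1" m xs)
          = fun m => a m + pvTot "N1" m (kv :: xs) := by
        funext m; rw [htot]; simp [h1]; ring
      have hb : (fun m => b m + pvTot "Nova S" m xs)
          = fun m => b m + pvTot "Nova S" m (kv :: xs) := by
        funext m; rw [htot]; simp [hn]
      rw [ha, hb]
    · by_cases h2 : pvChan kv.1 = "Nova S"
      · rw [if_neg h1, if_pos h2, ih]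
        have hn : ("N1" == pvChan kv.1) = false := by
          simp only [beq_eq_false_iff_ne, ne_eq, h2]; decide
        have ha : (fun m => a m + pvTot "N1" m xs)
            = fun m => a m + pvTot "N1" m (kv :: xs) := by
          funext m; rw [htot]; simp [hn]
        have hb : (fun m => b m + PySem.List.pyGetD kv.2 m 0 + pvTot "Nova S" m xs)
            = fun m => b m + pvTot "Nova S" m (kv :: xs) := by
          funext m; rw [htot]; simp [h2]; ring
        rw [ha, hb]
      · rw [if_neg h1, if_neg h2, ih]
        have e1 : ("N1" == pvChan kv.1) = false := by
          simp only [beq_eq_false_iff_ne, ne_eq]; exact fun h => h1 h.symm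
        have e2 : ("Nova S" == pvChan kv.1) = false := by
          simp only [beq_eq_false_iff_ne, ne_eq]; exact fun h => h2 h.symm
        have ha : (fun m => a m + pvTot "N1" m xs)
            = fun m => a m + pvTot "N1" m (kv :: xs) := by
          funext m; rw [htot]; simp [e1]
        have hb : (fun m => b m + pvTot "Nova S" m xs)
            = fun m => b m + pvTot "Nova S" m (kv :: xs) := by
          funext m; rw [htot]; simp [e2]
        rw [ha, hb]

-- ===== VERDICT (by name: the statement is the Claim_ definition above) =====
theorem n1_nova_s_total_for_months_spec : Claim_equal_n1_nova_s_total_for_months := by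
  intro xs _ _
  unfold Spec_n1_nova_s_total_for_months
  rw [pvA_char]
  show _ = n1_nova_s_total_for_months_alt xs
  unfold n1_nova_s_total_for_months_alt
  have hinit : (["N1", "Nova S"] : List String).map
      (fun ch => (ch, (PySem.List.pyRange 0 12 1).map (fun m => (m, (0:Int)))))
      = [("N1", pvTbl (fun _ => 0)), ("Nova S", pvTbl (fun _ => 0))] := by
    simp [pvTbl]
  rw [hinit, pvB_loop]
  simp
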